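-- pv_equiv track=rewrite | github.com/mlotocki2k/KSeF_Monitor | app/invoice_pdf_generator.py | _resolve_vat_summary_labels
-- ===== SOURCE A (Python) =====
-- _P12_TO_P13 = {
--     '22': 'P_13_1', '23': 'P_13_1',
--     '7': 'P_13_2', '8': 'P_13_2',
-- }
--
-- def _resolve_vat_summary_labels(items: list) -> dict:
--     """Determine actual VAT rate labels from invoice line items.
--
--     For ambiguous summary rows (P_13_1 covers 22%/23%, P_13_2 covers 7%/8%),
--     inspect the items' P_12 values to build a precise label.
--     """
--     labels = {}
--     for p13_field in ('P_13_1', 'P_13_2'):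
--         possible = [p12 for p12, p13 in _P12_TO_P13.items() if p13 == p13_field]
--         actual = sorted(
--             {it['p12'] for it in items if it.get('p12') in possible},
--             key=lambda x: int(x),
--         )
--         if actual:
--             labels[p13_field] = ' / '.join(f'{r}%' for r in actual)
--     return labels
-- ===== SOURCE B (Python) =====
-- _P12_TO_P13 = {
--     '22': 'P_13_1', '23': 'P_13_1',
--     '7': 'P_13_2', '8': 'P_13_2',
-- }
--
-- def _resolve_vat_summary_labels(items: list) -> dict:
--     """Single pass over items building per-field buckets, then format."""
--     buckets = {}
--     for it in items:
--         p12 = it.get('p12')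
--         field = _P12_TO_P13.get(p12)
--         if field is not None:
--             buckets.setdefault(field, set()).add(p12)
--     labels = {}
--     for field in ('P_13_1', 'P_13_2'):
--         if field in buckets:
--             labels[field] = ' / '.join(
--                 f'{r}%' for r in sorted(buckets[field], key=int))
--     return labels
-- ===== Notes on version B (the rewrite author's own statement) =====
-- stated objective: alternative
-- what changed: Replaces A's two field-driven scans (each rebuilding 'possible' and filtering all items) with one item-driven pass that buckets each item's p12 under its target field via a dict lookup, followed by a small formatting pass over the two fields.
import Mathlib
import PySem

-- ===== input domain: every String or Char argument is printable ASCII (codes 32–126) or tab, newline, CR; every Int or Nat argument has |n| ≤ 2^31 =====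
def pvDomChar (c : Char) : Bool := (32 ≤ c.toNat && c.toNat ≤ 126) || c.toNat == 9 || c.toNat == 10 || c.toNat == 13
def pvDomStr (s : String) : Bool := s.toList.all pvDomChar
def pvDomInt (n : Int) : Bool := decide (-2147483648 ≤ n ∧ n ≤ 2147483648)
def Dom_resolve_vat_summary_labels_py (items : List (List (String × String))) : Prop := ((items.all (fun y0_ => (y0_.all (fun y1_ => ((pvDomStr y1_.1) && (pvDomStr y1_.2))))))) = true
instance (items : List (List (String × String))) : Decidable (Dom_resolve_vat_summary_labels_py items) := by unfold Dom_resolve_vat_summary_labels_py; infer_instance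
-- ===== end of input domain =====

-- B replaces A's two field-driven filtered scans over the items with one item-driven
-- pass that buckets each p12 under its target field, then formats the two fields.


-- shared module constant _P12_TO_P13 (an association list in insertion order)
def pvP12toP13 : List (String × String) :=
  [("22", "P_13_1"), ("23", "P_13_1"), ("7", "P_13_2"), ("8", "P_13_2")]

-- dict lookup, first match (= d.get(k)); items dicts arrive as assoc lists
def pvDictGet (d : List (String × String)) (k : String) : Option String :=
  (d.find? (fun p => p.1 == k)).map (·.2)

-- ===== PORT A =====
-- the set comprehension {it['p12'] for it in items if it.get('p12') in possible}
-- (it['p12'] = the same value the guard just tested, so bind is exact)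
def resolve_vat_summary_labels_py (items : List (List (String × String))) : List (String × String) :=
  (["P_13_1", "P_13_2"].foldl (fun labels p13_field =>
    let possible := (pvP12toP13.filter (fun pr => pr.2 == p13_field)).map (·.1)
    let actual := PySem.List.sorted
      (PySem.Set.ofList (items.filterMap (fun it =>
        (pvDictGet it "p12").bind (fun v => if possible.contains v then some v else none))))
      (fun x => (PySem.Int.ofStr? x).getD 0) false
    if actual ≠ [] then
      labels ++ [(p13_field, PySem.Str.join " / " (actual.map (fun r => r ++ "%")))]
    else labels) [])

-- ===== PORT B =====
def resolve_vat_summary_labels_py_alt (items : List (List (String × String))) : List (String × String) :=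
  let buckets : PySem.Dict String (PySem.Set String) :=
    items.foldl (fun b it =>
      match pvDictGet it "p12" with
      | none => b
      | some p12 =>
        match pvDictGet pvP12toP13 p12 with
        | none => b
        | some field => b.insert field (((b.get? field).getD PySem.Set.empty).add p12)) PySem.Dict.empty
  ["P_13_1", "P_13_2"].foldl (fun labels field =>
    match buckets.get? field with
    | none => labels
    | some s =>
      labels ++ [(field, PySem.Str.join " / "
        ((PySem.List.sorted s (fun x => (PySem.Int.ofStr? x).getD 0) false).map (fun r => r ++ "%")))]) []

-- ===== PRECONDITION & SPEC =====
def Spec_resolve_vat_summary_labels_py (items : List (List (String × String))) (out : List (String × String)) : Prop := out = resolve_vat_summary_labels_py_alt items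
instance (items : List (List (String × String))) (out : List (String × String)) : Decidable (Spec_resolve_vat_summary_labels_py items out) := by unfold Spec_resolve_vat_summary_labels_py; infer_instance

-- ===== CLAIM (what is proved, stated in full; the proofs are below) =====
def Claim_equal_resolve_vat_summary_labels_py : Prop := ∀ (items : List (List (String × String))), Dom_resolve_vat_summary_labels_py items → Spec_resolve_vat_summary_labels_py items (resolve_vat_summary_labels_py items)

-- ===== LEMMAS AND PROOFS =====

-- the values A collects for one field, as a plain list in item order
def pvColl (pa : List String) (items : List (List (String × String))) : List String :=
  items.filterMap (fun it =>
    (pvDictGet it "p12").bind (fun v => if pa.contains v then some v else none))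

-- B's bucket step
def pvStep (b : PySem.Dict String (PySem.Set String)) (it : List (String × String)) :
    PySem.Dict String (PySem.Set String) :=
  match pvDictGet it "p12" with
  | none => b
  | some p12 =>
    match pvDictGet pvP12toP13 p12 with
    | none => b
    | some field => b.insert field (((b.get? field).getD PySem.Set.empty).add p12)

lemma pvColl_cons (pa : List String) (it : List (String × String)) (rest : List (List (String × String))) :
    pvColl pa (it :: rest) =
      ((pvDictGet it "p12").bind (fun v => if pa.contains v then some v else none)).toList
        ++ pvColl pa rest := by
  unfold pvColl
  rw [List.filterMap_cons]
  cases (pvDictGet it "p12").bind (fun v => if pa.contains v then some v else none) <;> simp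

-- v != a turned into the Bool form the constant lookup matches on
lemma pvBeqF {a v : String} (h : ¬ v = a) : (a == v) = false :=
  beq_false_of_ne fun e => h e.symm

-- the constant-dict lookup, characterised per field
lemma pvLookup_char (v : String) (F : String) (pa : List String)
    (hF : (F = "P_13_1" ∧ pa = ["22", "23"]) ∨ (F = "P_13_2" ∧ pa = ["7", "8"])) :
    (pvDictGet pvP12toP13 v = some F ↔ pa.contains v = true) ∧
    (∀ F', pvDictGet pvP12toP13 v = some F' → F' ≠ F → pa.contains v = false) := by
  rcases hF with ⟨hF, hpa⟩ | ⟨hF, hpa⟩ <;> subst hF <;> subst hpa <;>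
    by_cases h22 : v = "22" <;> by_cases h23 : v = "23" <;>
    by_cases h7 : v = "7" <;> by_cases h8 : v = "8" <;> subst_vars <;>
    first
      | decide
      | (simp [pvDictGet, pvP12toP13, List.find?, pvBeqF h22, pvBeqF h23, pvBeqF h7, pvBeqF h8];
          constructor <;> assumption)

-- fold-fusion: B's bucket for field F is fed exactly the values of pvColl pa items, in order
lemma pvBucket_fold (F : String) (pa : List String)
    (hF : (F = "P_13_1" ∧ pa = ["22", "23"]) ∨ (F = "P_13_2" ∧ pa = ["7", "8"]))
    (items : List (List (String × String))) (d : PySem.Dict String (PySem.Set String)) :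
    (items.foldl pvStep d).get? F =
      (pvColl pa items).foldl (fun o v => some (((o.getD PySem.Set.empty).add v))) (d.get? F) := by
  induction items generalizing d with
  | nil => simp [pvColl]
  | cons it rest ih =>
    rw [List.foldl_cons, ih, pvColl_cons, List.foldl_append]
    congr 1
    cases hg : pvDictGet it "p12" with
    | none => simp [pvStep, hg]
    | some v =>
      cases hl : pvDictGet pvP12toP13 v with
      | none =>
        have hc : pa.contains v = false := by
          by_cases c : pa.contains v = true
          · exact absurd ((pvLookup_char v F pa hF).1.mpr c) (by simp [hl])
          · simpa using c
        have hv : v ∉ pa := by simpa using hc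
        simp [pvStep, hg, hl, hv]
      | some F' =>
        simp only [pvStep, hg, hl]
        by_cases hFF : F' = F
        · subst hFF
          have h : v ∈ pa := by simpa using (pvLookup_char v F' pa hF).1.mp hl
          simp [h, PySem.Dict.get?_insert_self]
        · have hc : pa.contains v = false := (pvLookup_char v F pa hF).2 F' hl hFF
          have hv : v ∉ pa := by simpa using hc
          simp [hv, PySem.Dict.get?_insert_of_ne _ _ (Ne.symm hFF)]

lemma pvFoldAdd (l : List String) (s : PySem.Set String) :
    l.foldl (fun (o : Option (PySem.Set String)) v => some ((o.getD PySem.Set.empty).add v)) (some s)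
      = some (l.foldl PySem.Set.add s) := by
  induction l generalizing s with
  | nil => rfl
  | cons v t ih =>
    simp only [List.foldl_cons, Option.getD_some]
    exact ih (s.add v)

lemma pvFoldNone (l : List String) :
    l.foldl (fun (o : Option (PySem.Set String)) v => some ((o.getD PySem.Set.empty).add v)) none
      = if l = [] then none else some (PySem.Set.ofList l) := by
  cases l with
  | nil => rfl
  | cons v t =>
    simp only [List.foldl_cons, Option.getD_none, PySem.Set.ofList_eq_foldl,
      if_neg (List.cons_ne_nil v t)]
    have hadd : PySem.Set.add PySem.Set.empty v = [v] := rfl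
    rw [hadd]
    exact pvFoldAdd t [v]

-- filterMap form of A's collection, folded back to pvColl
lemma pvColl_eq (pa : List String) (items : List (List (String × String))) :
    items.filterMap (fun it =>
      (pvDictGet it "p12").bind (fun v => if pa.contains v then some v else none)) = pvColl pa items := rfl

lemma pvOfListNilIff (l : List String) : PySem.Set.ofList l = [] ↔ l = [] := by
  cases l with
  | nil => simp [PySem.Set.ofList_eq_foldl]
  | cons v t =>
    constructor
    · intro h
      have hv : v ∈ PySem.Set.ofList (v :: t) := (PySem.Set.mem_ofList _ _).mpr (by simp)
      rw [h] at hv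
      simp at hv
    · intro h
      simp at h

-- ===== VERDICT (by name: the statement is the Claim_ definition above) =====
theorem resolve_vat_summary_labels_py_spec : Claim_equal_resolve_vat_summary_labels_py := by
  intro items _
  unfold Spec_resolve_vat_summary_labels_py resolve_vat_summary_labels_py resolve_vat_summary_labels_py_alt
  have h1 := pvBucket_fold "P_13_1" ["22", "23"] (Or.inl ⟨rfl, rfl⟩) items PySem.Dict.empty
  have h2 := pvBucket_fold "P_13_2" ["7", "8"] (Or.inr ⟨rfl, rfl⟩) items PySem.Dict.empty
  have hstep : (fun (b : PySem.Dict String (PySem.Set String)) (it : List (String × String)) =>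
      match pvDictGet it "p12" with
      | none => b
      | some p12 =>
        match pvDictGet pvP12toP13 p12 with
        | none => b
        | some field => b.insert field (((b.get? field).getD PySem.Set.empty).add p12)) = pvStep := rfl
  have e1 : (pvP12toP13.filter (fun pr => pr.2 == "P_13_1")).map (·.1) = ["22", "23"] := rfl
  have e2 : (pvP12toP13.filter (fun pr => pr.2 == "P_13_2")).map (·.1) = ["7", "8"] := rfl
  have hget : ∀ F : String, (PySem.Dict.empty : PySem.Dict String (PySem.Set String)).get? F = none := by
    intro F; simp
  rw [hget] at h1 h2
  simp only [List.foldl_cons, List.foldl_nil, hstep, e1, e2, h1, h2, pvFoldNone, pvColl_eq]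
  by_cases hL1 : pvColl ["22", "23"] items = [] <;>
    by_cases hL2 : pvColl ["7", "8"] items = [] <;>
      simp [hL1, hL2, PySem.List.sorted_eq_nil_iff, pvOfListNilIff]
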